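-- pv_equiv track=rewrite | github.com/BuffJesus/X4POCreator | parsers.py | build_pack_size_fallbacks
-- ===== SOURCE A (Python) =====
-- from collections import Counter, defaultdict
--
-- def build_pack_size_fallbacks(pack_size_lookup):
--     by_item = defaultdict(set)
--     for (_, item_code), pack in pack_size_lookup.items():
--         if pack and pack > 0:
--             by_item[item_code].add(int(pack))
--     fallback = {}
--     conflicts = set()
--     for item_code, packs in by_item.items():
--         if len(packs) == 1:
--             fallback[item_code] = next(iter(packs))
--         elif len(packs) > 1:
--             conflicts.add(item_code)
--     return fallback, conflicts
-- ===== SOURCE B (Python) =====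
-- def build_pack_size_fallbacks(pack_size_lookup):
--     # Staged passes over the raw valid entries: a first-seen representative per
--     # item, then conflict detection by disagreement with that representative --
--     # no per-item set of pack sizes is ever built.
--     valid = [(item_code, int(pack))
--              for (_, item_code), pack in pack_size_lookup.items()
--              if pack and pack > 0]
--     first = {}
--     for item_code, p in valid:
--         first.setdefault(item_code, p)
--     bad = {item_code for item_code, p in valid if p != first[item_code]}
--     fallback = {k: v for k, v in first.items() if k not in bad}
--     conflicts = {k for k in first if k in bad}
--     return fallback, conflicts
-- ===== Notes on version B (the rewrite author's own statement) =====
-- stated objective: alternative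
-- what changed: Replaces A's grouping of packs into per-item sets classified by cardinality with staged passes over the raw valid entries: record a first-seen representative pack per item, collect the items whose later pack disagrees with that representative, then split the representative dict by membership in that disagreement set; no per-item set of pack sizes is ever built.
import Mathlib
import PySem

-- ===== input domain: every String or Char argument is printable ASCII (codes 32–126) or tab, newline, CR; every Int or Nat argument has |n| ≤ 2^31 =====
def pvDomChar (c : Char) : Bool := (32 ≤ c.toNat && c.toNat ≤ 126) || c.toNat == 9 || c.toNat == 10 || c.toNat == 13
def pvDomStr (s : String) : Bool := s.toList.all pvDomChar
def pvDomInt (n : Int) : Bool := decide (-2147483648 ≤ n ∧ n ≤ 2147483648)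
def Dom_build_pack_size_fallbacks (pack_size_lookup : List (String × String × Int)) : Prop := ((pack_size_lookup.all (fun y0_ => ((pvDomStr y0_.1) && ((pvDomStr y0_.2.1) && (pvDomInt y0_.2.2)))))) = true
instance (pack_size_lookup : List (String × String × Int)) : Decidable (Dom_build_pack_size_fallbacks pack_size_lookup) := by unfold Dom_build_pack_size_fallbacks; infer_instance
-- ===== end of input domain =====

-- B replaces A's per-item set-of-packs + cardinality classification with staged
-- passes over the raw valid entries: a first-seen representative pack per item,
-- a disagreement set, and a final split of the representative dict — an
-- alternative algorithm that never builds a per-item set of pack sizes.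


-- ===== PORT A =====
-- loop body of A's first loop: `if pack and pack > 0: by_item[item_code].add(int(pack))`
-- (pack is an int, so `int(pack)` is `pack`; defaultdict(set) access = modify with empty-set default)
def pvStepA (d : PySem.Dict String (PySem.Set Int)) (y : String × String × Int) :
    PySem.Dict String (PySem.Set Int) :=
  if y.2.2 ≠ 0 ∧ y.2.2 > 0 then
    d.modify y.2.1 PySem.Set.empty (fun s => PySem.Set.add s y.2.2)
  else d

-- loop body of A's second loop (next(iter(packs)) on a singleton set = its head)
def pvStepA2 (p : PySem.Dict String Int × PySem.Set String) (kv : String × PySem.Set Int) :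
    PySem.Dict String Int × PySem.Set String :=
  if kv.2.length = 1 then (p.1.insert kv.1 (kv.2.headD 0), p.2)
  else if kv.2.length > 1 then (p.1, PySem.Set.add p.2 kv.1)
  else p

def build_pack_size_fallbacks (pack_size_lookup : List (String × String × Int)) :
    (List (String × Int)) × List String :=
  let by_item := pack_size_lookup.foldl pvStepA PySem.Dict.empty
  let fc := by_item.items.foldl pvStepA2 (PySem.Dict.empty, PySem.Set.empty)
  (fc.1.items, fc.2)

-- ===== PORT B =====
-- B's `valid` comprehension: `[(item_code, int(pack)) for (_, item_code), pack in … if pack and pack > 0]`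
def pvValid (l : List (String × String × Int)) : List (String × Int) :=
  l.filterMap (fun y => if y.2.2 ≠ 0 ∧ y.2.2 > 0 then some (y.2.1, y.2.2) else none)

-- B's loop body: `first.setdefault(item_code, p)`
def pvSd (d : PySem.Dict String Int) (kp : String × Int) : PySem.Dict String Int :=
  d.setdefault kp.1 kp.2

-- B's set comprehension `{item_code for item_code, p in valid if p != first[item_code]}`
-- (`first[item_code]` never raises: item_code comes from valid, so it is a key of first;
--  ported as getD with default 0, exact on those keys)
def pvBadOf (v : List (String × Int)) (first : PySem.Dict String Int) : PySem.Set String :=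
  PySem.Set.ofList ((v.filter (fun kp => decide (kp.2 ≠ first.getD kp.1 0))).map Prod.fst)

def build_pack_size_fallbacks_alt (pack_size_lookup : List (String × String × Int)) :
    (List (String × Int)) × List String :=
  let valid := pvValid pack_size_lookup
  let first := valid.foldl pvSd PySem.Dict.empty
  let bad := pvBadOf valid first
  -- dict comprehension over first.items() (distinct keys) filtered by membership in bad
  let fallback := PySem.Dict.mk (first.items.filter (fun kv => !(PySem.Set.contains bad kv.1)))
  -- set comprehension iterating the dict `first` (its keys are distinct, in insertion order)
  let conflicts := PySem.Set.ofList (first.keys.filter (fun k => PySem.Set.contains bad k))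
  (fallback.items, conflicts)

-- ===== PRECONDITION & SPEC =====
def Spec_build_pack_size_fallbacks (pack_size_lookup : List (String × String × Int)) (out : (List (String × Int)) × List String) : Prop := out = build_pack_size_fallbacks_alt pack_size_lookup
instance (pack_size_lookup : List (String × String × Int)) (out : (List (String × Int)) × List String) : Decidable (Spec_build_pack_size_fallbacks pack_size_lookup out) := by unfold Spec_build_pack_size_fallbacks; infer_instance

-- ===== CLAIM (what is proved, stated in full; the proofs are below) =====
def Claim_equal_build_pack_size_fallbacks : Prop := ∀ (pack_size_lookup : List (String × String × Int)), Dom_build_pack_size_fallbacks pack_size_lookup → Spec_build_pack_size_fallbacks pack_size_lookup (build_pack_size_fallbacks pack_size_lookup)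

-- ===== LEMMAS AND PROOFS =====

-- A's first loop, restricted to the entries its guard admits, as a fold over pvValid
def pvStepP (d : PySem.Dict String (PySem.Set Int)) (kp : String × Int) :
    PySem.Dict String (PySem.Set Int) :=
  d.modify kp.1 PySem.Set.empty (fun s => PySem.Set.add s kp.2)

theorem pvFoldA_valid : ∀ (l : List (String × String × Int)) (d : PySem.Dict String (PySem.Set Int)),
    l.foldl pvStepA d = (pvValid l).foldl pvStepP d := by
  intro l
  induction l with
  | nil => intro d; rfl
  | cons y t ih =>
    intro d
    by_cases h : y.2.2 ≠ 0 ∧ y.2.2 > 0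
    · have hv : pvValid (y :: t) = (y.2.1, y.2.2) :: pvValid t := by
        simp only [pvValid, List.filterMap_cons, if_pos h]
      have ha : pvStepA d y = pvStepP d (y.2.1, y.2.2) := by
        simp only [pvStepA, pvStepP, if_pos h]
      rw [List.foldl_cons, hv, List.foldl_cons, ha, ih]
    · have hv : pvValid (y :: t) = pvValid t := by
        simp only [pvValid, List.filterMap_cons, if_neg h]
      have ha : pvStepA d y = d := by simp only [pvStepA, if_neg h]
      rw [List.foldl_cons, hv, ha, ih]

theorem pvAdd_ne_nil (s : List Int) (p : Int) : PySem.Set.add s p ≠ [] := by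
  unfold PySem.Set.add
  split
  · rename_i hc
    rintro rfl
    simp [PySem.Set.contains] at hc
  · simp

theorem pvHeadD_add (s : List Int) (p : Int) (hs : s ≠ []) :
    (PySem.Set.add s p).headD 0 = s.headD 0 := by
  unfold PySem.Set.add
  split
  · rfl
  · match s with
    | [] => exact absurd rfl hs
    | a :: t => rfl

-- B's status dict (first-seen pack per item) as a function of A's by_item dict: heads
def pvFirstMap (d : PySem.Dict String (PySem.Set Int)) : PySem.Dict String Int :=
  PySem.Dict.mk (d.items.map (fun kv => (kv.1, kv.2.headD 0)))

theorem pvFirstMap_items (d : PySem.Dict String (PySem.Set Int)) :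
    (pvFirstMap d).items = d.items.map (fun kv => (kv.1, kv.2.headD 0)) := rfl

theorem pvFirstMap_contains (d : PySem.Dict String (PySem.Set Int)) (k : String) :
    (pvFirstMap d).contains k = d.contains k := by
  simp [pvFirstMap, PySem.Dict.contains, Function.comp_def]

theorem pvFirstMap_get? (d : PySem.Dict String (PySem.Set Int)) (k : String) :
    (pvFirstMap d).get? k = (d.get? k).map (fun s => s.headD 0) := by
  simp only [pvFirstMap, PySem.Dict.get?]
  rw [List.find?_map]
  simp [Function.comp_def]

theorem pvFirstMap_keys (d : PySem.Dict String (PySem.Set Int)) :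
    (pvFirstMap d).keys = d.keys := by
  simp [pvFirstMap, PySem.Dict.keys]

theorem pvSd_comm (d : PySem.Dict String (PySem.Set Int)) (kp : String × Int)
    (hne : ∀ kv ∈ d.items, kv.2 ≠ []) (hnd : d.keys.Nodup) :
    pvSd (pvFirstMap d) kp = pvFirstMap (pvStepP d kp) := by
  unfold pvSd pvStepP
  rw [PySem.Dict.modify]
  by_cases hc : d.contains kp.1 = true
  · -- key present: setdefault is a no-op, the modified set keeps its head
    obtain ⟨s, hs⟩ : ∃ s, d.get? kp.1 = some s := by
      rcases h : d.get? kp.1 with _ | s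
      · rw [PySem.Dict.contains_eq_isSome_get?, h] at hc; simp at hc
      · exact ⟨s, rfl⟩
    have hsne : s ≠ [] := hne _ (PySem.Dict.mem_items_of_get?_eq_some (d := d) hs)
    have hgd : d.getD kp.1 PySem.Set.empty = s := PySem.Dict.getD_of_get?_eq_some _ _ hs
    have hcm : (pvFirstMap d).contains kp.1 = true := by rw [pvFirstMap_contains]; exact hc
    rw [PySem.Dict.setdefault_of_contains _ _ hcm, hgd]
    apply PySem.Dict.ext
    rw [pvFirstMap_items, pvFirstMap_items, PySem.Dict.items_insert_of_contains _ _ hc]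
    rw [List.map_map]
    apply List.map_congr_left
    intro kv hkv
    by_cases hk : (kv.1 == kp.1) = true
    · have hk' : kv.1 = kp.1 := by simpa using hk
      have hkv2 : kv.2 = s := by
        have hmem : (kp.1, kv.2) ∈ d.items := by rw [← hk']; exact hkv
        have := PySem.Dict.get?_of_mem_items _ hmem hnd
        rw [hs] at this
        exact (Option.some_inj.mp this).symm
      simp only [Function.comp_def, hk, if_true]
      rw [hk', hkv2, pvHeadD_add s kp.2 hsne]
    · have hk' : ¬ kv.1 = kp.1 := by simpa using hk
      simp [hk']
  · -- fresh key: setdefault inserts kp.2, modify inserts the singleton set [kp.2]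
    have hc' : d.contains kp.1 = false := by simpa using hc
    have hcm : (pvFirstMap d).contains kp.1 = false := by rw [pvFirstMap_contains]; exact hc'
    have hgd : d.getD kp.1 PySem.Set.empty = PySem.Set.empty :=
      PySem.Dict.getD_of_not_contains _ _ hc'
    rw [PySem.Dict.setdefault_of_not_contains _ _ hcm, hgd]
    apply PySem.Dict.ext
    rw [pvFirstMap_items, PySem.Dict.items_insert_of_not_contains _ _ hcm,
        pvFirstMap_items, PySem.Dict.items_insert_of_not_contains _ _ hc']
    simp

theorem pvStepP_hne (d : PySem.Dict String (PySem.Set Int)) (kp : String × Int)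
    (hne : ∀ kv ∈ d.items, kv.2 ≠ []) :
    ∀ kv ∈ (pvStepP d kp).items, kv.2 ≠ [] := by
  unfold pvStepP
  intro kv hkv
  rw [PySem.Dict.modify] at hkv
  rcases (PySem.Dict.mem_items_insert _ _ _ _).1 hkv with h | ⟨h, _⟩
  · subst h
    exact pvAdd_ne_nil _ _
  · exact hne _ h

theorem pvStepP_nodup (d : PySem.Dict String (PySem.Set Int)) (kp : String × Int)
    (hnd : d.keys.Nodup) : (pvStepP d kp).keys.Nodup := by
  unfold pvStepP
  rw [PySem.Dict.modify]
  exact PySem.Dict.nodup_keys_insert _ _ _ hnd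

theorem pvFold_hne (v : List (String × Int)) :
    ∀ kv ∈ (v.foldl pvStepP PySem.Dict.empty).items, kv.2 ≠ [] := by
  have h : ∀ (v : List (String × Int)) (d : PySem.Dict String (PySem.Set Int)),
      (∀ kv ∈ d.items, kv.2 ≠ []) → ∀ kv ∈ (v.foldl pvStepP d).items, kv.2 ≠ [] := by
    intro v
    induction v with
    | nil => intro d hd; exact hd
    | cons y t ih => intro d hd; exact ih _ (pvStepP_hne d y hd)
  exact h v PySem.Dict.empty (by intro kv hkv; simp [PySem.Dict.empty] at hkv)

theorem pvFold_nodup (v : List (String × Int)) :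
    (v.foldl pvStepP PySem.Dict.empty).keys.Nodup := by
  have h : ∀ (v : List (String × Int)) (d : PySem.Dict String (PySem.Set Int)),
      d.keys.Nodup → (v.foldl pvStepP d).keys.Nodup := by
    intro v
    induction v with
    | nil => intro d hd; exact hd
    | cons y t ih => intro d hd; exact ih _ (pvStepP_nodup d y hd)
  exact h v PySem.Dict.empty (by simp [PySem.Dict.empty, PySem.Dict.keys])

theorem pvFirst_fold : ∀ (v : List (String × Int)) (d : PySem.Dict String (PySem.Set Int)),
    (∀ kv ∈ d.items, kv.2 ≠ []) → d.keys.Nodup →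
    v.foldl pvSd (pvFirstMap d) = pvFirstMap (v.foldl pvStepP d) := by
  intro v
  induction v with
  | nil => intro d _ _; rfl
  | cons y t ih =>
    intro d hne hnd
    simp only [List.foldl_cons]
    rw [pvSd_comm d y hne hnd]
    exact ih _ (pvStepP_hne d y hne) (pvStepP_nodup d y hnd)

-- the content invariant of A's grouping fold: each key's set holds exactly the packs
-- seen for that key so far (distinct, in first-occurrence order)
def pvInv (d : PySem.Dict String (PySem.Set Int)) (w : List (String × Int)) : Prop :=
  (∀ k s, d.get? k = some s → s ≠ [] ∧ s.Nodup ∧ (∀ p : Int, p ∈ s ↔ (k, p) ∈ w)) ∧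
  (∀ k, d.get? k = none → ∀ p : Int, (k, p) ∉ w)

theorem pvNodup_add (s : List Int) (p : Int) (h : s.Nodup) : (PySem.Set.add s p).Nodup := by
  unfold PySem.Set.add
  split
  · exact h
  · rename_i hc
    have hp : p ∉ s := by simpa [PySem.Set.contains] using hc
    rw [List.nodup_append]
    refine ⟨h, by simp, ?_⟩
    intro a ha b hb
    have hbp : b = p := by simpa using hb
    subst hbp
    exact fun hab => hp (hab ▸ ha)

theorem pvMem_add (s : List Int) (p q : Int) :
    q ∈ PySem.Set.add s p ↔ q ∈ s ∨ q = p := by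
  unfold PySem.Set.add
  split
  · rename_i hc
    have hp : p ∈ s := by simpa [PySem.Set.contains] using hc
    constructor
    · intro h; exact Or.inl h
    · rintro (h | rfl)
      · exact h
      · exact hp
  · simp

theorem pvInv_step (d : PySem.Dict String (PySem.Set Int)) (w : List (String × Int))
    (kp : String × Int) (h : pvInv d w) : pvInv (pvStepP d kp) (w ++ [kp]) := by
  obtain ⟨h1, h2⟩ := h
  unfold pvStepP
  rw [PySem.Dict.modify]
  constructor
  · intro k s hs
    rw [PySem.Dict.get?_insert] at hs
    by_cases hk : k = kp.1
    · rw [if_pos hk] at hs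
      have hs' : s = PySem.Set.add (d.getD kp.1 PySem.Set.empty) kp.2 := (Option.some_inj.mp hs).symm
      rcases hg : d.get? kp.1 with _ | s0
      · have hgd : d.getD kp.1 PySem.Set.empty = PySem.Set.empty :=
          PySem.Dict.getD_of_get?_eq_none _ _ hg
        rw [hgd] at hs'
        have : s = [kp.2] := hs'
        subst this
        refine ⟨by simp, by simp, ?_⟩
        intro p
        subst hk
        have hnot := h2 _ hg
        simp only [List.mem_append, List.mem_cons, List.not_mem_nil, or_false]
        constructor
        · intro hp
          have : p = kp.2 := by simpa using hp
          subst this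
          right; rfl
        · rintro (hp | hp)
          · exact absurd hp (hnot p)
          · have : p = kp.2 := by
              have := congrArg Prod.snd hp; simpa using this
            simp [this]
      · have hgd : d.getD kp.1 PySem.Set.empty = s0 :=
          PySem.Dict.getD_of_get?_eq_some _ _ hg
        rw [hgd] at hs'
        obtain ⟨hs0ne, hs0nd, hs0mem⟩ := h1 _ _ hg
        subst hs'
        refine ⟨pvAdd_ne_nil _ _, pvNodup_add _ _ hs0nd, ?_⟩
        intro p
        subst hk
        rw [pvMem_add]
        simp only [List.mem_append, List.mem_singleton]
        constructor
        · rintro (hp | rfl)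
          · exact Or.inl ((hs0mem p).1 hp)
          · right; rfl
        · rintro (hp | hp)
          · exact Or.inl ((hs0mem p).2 hp)
          · right
            have := congrArg Prod.snd hp; simpa using this
    · rw [if_neg hk] at hs
      obtain ⟨hne, hnd, hmem⟩ := h1 _ _ hs
      refine ⟨hne, hnd, ?_⟩
      intro p
      rw [hmem p]
      simp only [List.mem_append, List.mem_singleton]
      constructor
      · intro hp; exact Or.inl hp
      · rintro (hp | hp)
        · exact hp
        · exact absurd (congrArg Prod.fst hp) (by simpa using hk)
  · intro k hk p
    rw [PySem.Dict.get?_insert] at hk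
    by_cases hkk : k = kp.1
    · rw [if_pos hkk] at hk; exact absurd hk (by simp)
    · rw [if_neg hkk] at hk
      intro hmem
      rcases List.mem_append.mp hmem with hp | hp
      · exact h2 _ hk p hp
      · exact absurd (congrArg Prod.fst (List.mem_singleton.mp hp)) (by simpa using hkk)

theorem pvInv_fold : ∀ (v w : List (String × Int)) (d : PySem.Dict String (PySem.Set Int)),
    pvInv d w → pvInv (v.foldl pvStepP d) (w ++ v) := by
  intro v
  induction v with
  | nil => intro w d h; simpa using h
  | cons y t ih =>
    intro w d h
    simp only [List.foldl_cons]
    have := ih (w ++ [y]) _ (pvInv_step d w y h)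
    simpa using this

theorem pvInv_final (v : List (String × Int)) :
    pvInv (v.foldl pvStepP PySem.Dict.empty) v := by
  have h0 : pvInv PySem.Dict.empty [] := by
    constructor
    · intro k s hs; simp [PySem.Dict.empty, PySem.Dict.get?] at hs
    · intro k _ p; simp
  simpa using pvInv_fold v [] PySem.Dict.empty h0

-- set(xs) of a duplicate-free list is the list itself
theorem pvOfList_nodup {α : Type} [BEq α] [LawfulBEq α] (xs : List α) (h : xs.Nodup) :
    PySem.Set.ofList xs = xs := by
  rw [← PySem.Set.update_nil_left,
      PySem.Set.update_eq_append_of_disjoint [] xs h (by intro x _; simp)]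
  simp

-- the crux: an item is in B's disagreement set iff A's set of packs for it has ≥ 2 elements
theorem pvBad_char (v : List (String × Int))
    (kv : String × PySem.Set Int)
    (hkv : kv ∈ (v.foldl pvStepP PySem.Dict.empty).items) :
    PySem.Set.contains (pvBadOf v (pvFirstMap (v.foldl pvStepP PySem.Dict.empty))) kv.1
      = decide (kv.2.length > 1) := by
  have hnd := pvFold_nodup v
  have hinv := pvInv_final v
  have hget : (v.foldl pvStepP PySem.Dict.empty).get? kv.1 = some kv.2 :=
    PySem.Dict.get?_of_mem_items _ hkv hnd
  obtain ⟨hne, hnodup, hmem⟩ := hinv.1 _ _ hget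
  have hfirst : (pvFirstMap (v.foldl pvStepP PySem.Dict.empty)).getD kv.1 0 = kv.2.headD 0 := by
    rw [PySem.Dict.getD_eq_get?_getD, pvFirstMap_get?, hget]; rfl
  rw [show PySem.Set.contains (pvBadOf v (pvFirstMap (v.foldl pvStepP PySem.Dict.empty))) kv.1
      = decide (kv.1 ∈ pvBadOf v (pvFirstMap (v.foldl pvStepP PySem.Dict.empty))) from by
    simp [PySem.Set.contains]]
  rw [decide_eq_decide]
  unfold pvBadOf
  rw [PySem.Set.mem_ofList]
  constructor
  · -- a disagreeing pack exists → the set has a second element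
    intro hin
    rcases List.mem_map.mp hin with ⟨kp, hkpmem, hkp1⟩
    rcases List.mem_filter.mp hkpmem with ⟨hkpv, hkpcond⟩
    have hcond : kp.2 ≠ (pvFirstMap (v.foldl pvStepP PySem.Dict.empty)).getD kp.1 0 := by
      simpa using hkpcond
    rw [hkp1, hfirst] at hcond
    have hp : kp.2 ∈ kv.2 := (hmem kp.2).2 (by rw [← hkp1]; simpa using hkpv)
    match hs : kv.2 with
    | [] => exact absurd hs hne
    | [a] =>
      rw [hs] at hp hcond
      have hpa : kp.2 = a := by simpa using hp
      rw [hpa] at hcond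
      simp at hcond
    | a :: b :: t => simp
  · -- the set has a second element → it disagrees with the head
    intro hlen
    match hs : kv.2 with
    | [] => exact absurd hs hne
    | [a] => rw [hs] at hlen; simp at hlen
    | a :: b :: t =>
      rw [hs] at hnodup hmem
      have hba : b ≠ a := by
        have := hnodup
        simp only [List.nodup_cons, List.mem_cons] at this
        exact fun h => this.1 (Or.inl h.symm)
      have hbv : (kv.1, b) ∈ v := (hmem b).1 (by simp)
      refine List.mem_map.mpr ⟨(kv.1, b), ?_, rfl⟩
      refine List.mem_filter.mpr ⟨hbv, ?_⟩
      rw [hfirst, hs]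
      simpa using hba

-- what A's second loop keeps for the fallback dict, per by_item entry
def pvG (kv : String × PySem.Set Int) : Option (String × Int) :=
  if kv.2.length = 1 then some (kv.1, kv.2.headD 0) else none

theorem pvFilterMap_if {α β : Type} (f : α → β) (p : α → Bool) (l : List α) :
    l.filterMap (fun x => if p x then some (f x) else none) = (l.filter p).map f := by
  induction l with
  | nil => rfl
  | cons x t ih =>
    by_cases h : p x = true
    · simp [h, ih]
    · simp [h, ih]

theorem pvPhase2 : ∀ (its : List (String × PySem.Set Int)) (fb : PySem.Dict String Int)
    (cf : PySem.Set String),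
    (its.map (fun kv => kv.1)).Nodup →
    (∀ k ∈ its.map (fun kv => kv.1), fb.contains k = false ∧ k ∉ cf) →
    its.foldl pvStepA2 (fb, cf) =
      (PySem.Dict.mk (fb.items ++ its.filterMap pvG),
       cf ++ (its.filter (fun kv => decide (kv.2.length > 1))).map (fun kv => kv.1)) := by
  intro its
  induction its with
  | nil => intro fb cf _ _; simp
  | cons kv t ih =>
    intro fb cf hnd hfresh
    have hk : fb.contains kv.1 = false ∧ kv.1 ∉ cf := hfresh kv.1 (by simp)
    have hndt : (t.map (fun kv => kv.1)).Nodup := by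
      simp only [List.map_cons, List.nodup_cons] at hnd; exact hnd.2
    have hknt : kv.1 ∉ t.map (fun kv => kv.1) := by
      simp only [List.map_cons, List.nodup_cons] at hnd; exact hnd.1
    simp only [List.foldl_cons]
    by_cases h1 : kv.2.length = 1
    · have hstep : pvStepA2 (fb, cf) kv = (fb.insert kv.1 (kv.2.headD 0), cf) := by
        simp [pvStepA2, h1]
      rw [hstep]
      rw [ih _ _ hndt (by
        intro k hkmem
        have hneq : k ≠ kv.1 := by rintro rfl; exact hknt hkmem
        refine ⟨?_, (hfresh k (by simp [hkmem])).2⟩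
        have hfk := (hfresh k (by simp [hkmem])).1
        rw [PySem.Dict.contains_insert]
        simp [hneq, hfk])]
      rw [PySem.Dict.items_insert_of_not_contains _ _ hk.1]
      have hg : pvG kv = some (kv.1, kv.2.headD 0) := by simp [pvG, h1]
      have hf : ¬ kv.2.length > 1 := by omega
      simp [hg, hf]
    · by_cases h2 : kv.2.length > 1
      · have hstep : pvStepA2 (fb, cf) kv = (fb, PySem.Set.add cf kv.1) := by
          simp [pvStepA2, h1, h2]
        rw [hstep, PySem.Set.add_of_not_mem hk.2]
        rw [ih _ _ hndt (by
          intro k hkmem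
          have hneq : k ≠ kv.1 := by rintro rfl; exact hknt hkmem
          refine ⟨(hfresh k (by simp [hkmem])).1, ?_⟩
          simp [hneq, (hfresh k (by simp [hkmem])).2])]
        have hg : pvG kv = none := by simp [pvG, h1]
        simp [hg, h2, List.append_assoc]
      · have hstep : pvStepA2 (fb, cf) kv = (fb, cf) := by
          simp [pvStepA2, h1, h2]
        rw [hstep]
        rw [ih _ _ hndt (fun k hkmem => hfresh k (by simp [hkmem]))]
        have hg : pvG kv = none := by simp [pvG, h1]
        simp [hg, h2]

-- ===== VERDICT (by name: the statement is the Claim_ definition above) =====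
theorem build_pack_size_fallbacks_spec : Claim_equal_build_pack_size_fallbacks := by
  intro l _
  unfold Spec_build_pack_size_fallbacks
  simp only [build_pack_size_fallbacks, build_pack_size_fallbacks_alt]
  rw [pvFoldA_valid]
  set v := pvValid l with hv
  set d := v.foldl pvStepP PySem.Dict.empty with hd
  have hne := pvFold_hne v
  have hnd := pvFold_nodup v
  have hfirst : v.foldl pvSd PySem.Dict.empty = pvFirstMap d := by
    have he : (PySem.Dict.empty : PySem.Dict String Int) = pvFirstMap PySem.Dict.empty := rfl
    rw [he, pvFirst_fold v PySem.Dict.empty (by intro kv hkv; simp [PySem.Dict.empty] at hkv)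
          (by simp [PySem.Dict.empty, PySem.Dict.keys])]
  have h2 := pvPhase2 d.items PySem.Dict.empty PySem.Set.empty
    (by simpa [PySem.Dict.keys] using hnd)
    (by intro k _; exact ⟨by simp [PySem.Dict.empty, PySem.Dict.contains],
        by simp [PySem.Set.empty]⟩)
  rw [h2, hfirst]
  rw [show (PySem.Dict.empty : PySem.Dict String Int).items = [] from rfl,
      show (PySem.Set.empty : List String) = ([] : List String) from rfl,
      List.nil_append, List.nil_append]
  simp only [Prod.mk.injEq]
  constructor
  · -- fallback components agree
    rw [pvFirstMap_items, List.filter_map]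
    have hA : d.items.filterMap pvG
        = (d.items.filter (fun kv => decide (kv.2.length = 1))).map
            (fun kv => (kv.1, kv.2.headD 0)) := by
      rw [← pvFilterMap_if (fun kv : String × PySem.Set Int => (kv.1, kv.2.headD 0))
            (fun kv => decide (kv.2.length = 1)) d.items]
      apply List.filterMap_congr
      intro kv _
      by_cases h : kv.2.length = 1
      · simp [pvG, h]
      · simp [pvG, h]
    rw [hA]
    congr 1
    apply List.filter_congr
    intro kv hkv
    have hb := pvBad_char v kv hkv
    have hne' := hne kv hkv
    have hlen : kv.2.length ≥ 1 := by
      cases hs : kv.2 with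
      | nil => exact absurd hs hne'
      | cons a t => simp
    simp only [Function.comp_def]
    rw [hb]
    by_cases h : kv.2.length = 1
    · simp [h, show ¬ kv.2.length > 1 by omega]
    · simp [h, show kv.2.length > 1 by omega]
  · -- conflict components agree
    rw [pvFirstMap_keys]
    have hndf : (d.keys.filter (fun k =>
        PySem.Set.contains (pvBadOf v (pvFirstMap d)) k)).Nodup :=
      hnd.filter _
    rw [pvOfList_nodup _ hndf]
    rw [show d.keys = d.items.map (fun kv => kv.1) from rfl]
    rw [List.filter_map]
    congr 1
    apply List.filter_congr
    intro kv hkv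
    have hb := pvBad_char v kv hkv
    simp only [Function.comp_def]
    exact hb.symm
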